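-- pv_equiv track=rewrite | github.com/Emory-OMOP/info | scripts/update_dqd_summary.py | _format_test_list_by_table
-- ===== SOURCE A (Python) =====
-- def _format_test_list_by_table(tests: list[dict], indent: str = "    ") -> list[str]:
--     """Format a list of test dicts grouped by table."""
--     by_table: dict[str, list[dict]] = {}
--     for t in tests:
--         by_table.setdefault(t["table"], []).append(t)
--
--     lines = []
--     for table in sorted(by_table):
--         items = by_table[table]
--         if len(items) == 1:
--             t = items[0]
--             col = t.get("column_name", "")
--             display = t.get("display", t.get("test_type", ""))
--             label = f"{table}.{col}" if col else table
--             lines.append(f"{indent}- `{label}` — {display}")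
--         else:
--             lines.append(f"{indent}- **{table}** ({len(items)} tests)")
--             for t in sorted(items, key=lambda x: x.get("column_name", "")):
--                 col = t.get("column_name", "")
--                 display = t.get("display", t.get("test_type", ""))
--                 label = col if col else "table-level"
--                 lines.append(f"{indent}    - `{label}` — {display}")
--     return lines
-- ===== SOURCE B (Python) =====
-- def _format_test_list_by_table(tests: list[dict], indent: str = "    ") -> list[str]:
--     """Format a list of test dicts grouped by table.
--
--     Sort once: stable-sort by column, then by table (the classic two-pass
--     stable-sort trick gives the (table, column) order), then emit each run of
--     equal tables in a single pass -- no dict bucketing, no per-group re-sort.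
--     """
--     ordered = sorted(sorted(tests, key=lambda t: t.get("column_name", "")),
--                      key=lambda t: t["table"])
--     lines = []
--     while ordered:
--         table = ordered[0]["table"]
--         k = 1
--         while k < len(ordered) and ordered[k]["table"] == table:
--             k += 1
--         group, ordered = ordered[:k], ordered[k:]
--         if len(group) == 1:
--             t = group[0]
--             col = t.get("column_name", "")
--             display = t.get("display", t.get("test_type", ""))
--             if col:
--                 lines.append(f"{indent}- `{table}.{col}` — {display}")
--             else:
--                 lines.append(f"{indent}- `{table}` — {display}")
--         else:
--             lines.append(f"{indent}- **{table}** ({len(group)} tests)")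
--             for t in group:
--                 col = t.get("column_name", "")
--                 display = t.get("display", t.get("test_type", ""))
--                 label = col if col else "table-level"
--                 lines.append(f"{indent}    - `{label}` — {display}")
--     return lines
-- ===== Notes on version B (the rewrite author's own statement) =====
-- stated objective: alternative
-- what changed: Replaces the dict-of-lists bucketing plus a per-bucket sort inside the emit loop by one global two-pass stable sort (by column, then by table) followed by a single group-runs scan; no dict and no per-group re-sorting.
import Mathlib
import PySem

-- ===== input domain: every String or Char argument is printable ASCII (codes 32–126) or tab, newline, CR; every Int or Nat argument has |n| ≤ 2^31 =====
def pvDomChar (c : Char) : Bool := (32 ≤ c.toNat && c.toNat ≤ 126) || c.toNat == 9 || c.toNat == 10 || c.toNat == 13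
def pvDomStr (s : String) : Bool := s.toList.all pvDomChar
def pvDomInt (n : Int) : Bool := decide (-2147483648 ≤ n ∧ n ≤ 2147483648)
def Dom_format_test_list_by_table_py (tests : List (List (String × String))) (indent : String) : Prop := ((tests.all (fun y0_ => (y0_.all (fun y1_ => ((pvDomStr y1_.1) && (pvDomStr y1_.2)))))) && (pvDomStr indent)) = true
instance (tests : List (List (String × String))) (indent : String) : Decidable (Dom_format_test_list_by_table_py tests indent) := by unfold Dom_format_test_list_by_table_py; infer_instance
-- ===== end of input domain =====

-- B replaces A's dict-of-lists bucketing + per-bucket sort by one global two-pass stable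
-- sort (by column, then by table) followed by a single group-runs scan (alternative, same cost).


-- shared one-line field accessors (both Pythons write these same expressions)
-- t["table"]: Python raises KeyError when absent — Pre_ excludes that, so getD "" is exact on Pre_
def pvTb (t : List (String × String)) : String := PySem.Dict.getD (PySem.Dict.mk t) "table" ""
-- t.get("column_name", "")
def pvCol (t : List (String × String)) : String := PySem.Dict.getD (PySem.Dict.mk t) "column_name" ""
-- t.get("display", t.get("test_type", ""))
def pvDisp (t : List (String × String)) : String :=
  PySem.Dict.getD (PySem.Dict.mk t) "display" (PySem.Dict.getD (PySem.Dict.mk t) "test_type" "")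

-- ===== PORT A =====
def format_test_list_by_table_py (tests : List (List (String × String))) (indent : String) : List String :=
  -- by_table.setdefault(t["table"], []).append(t)  ≡  by_table[k] = by_table.get(k, []) + [t]
  let by_table : PySem.Dict String (List (List (String × String))) :=
    tests.foldl (fun d t => d.modify (pvTb t) [] (fun v => v ++ [t])) PySem.Dict.empty
  -- for table in sorted(by_table): …
  (PySem.List.sorted by_table.keys (fun k => k) false).foldl (fun lines table =>
    let items := by_table.getD table []
    if items.length == 1 then
      let t := items.headD []
      let col := pvCol t
      let display := pvDisp t
      let label := if col == "" then table else table ++ "." ++ col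
      lines ++ [indent ++ "- `" ++ label ++ "` — " ++ display]
    else
      ((PySem.List.sorted items pvCol false).foldl (fun lines t =>
          let col := pvCol t
          let display := pvDisp t
          let label := if col == "" then "table-level" else col
          lines ++ [indent ++ "    - `" ++ label ++ "` — " ++ display])
        (lines ++ [indent ++ "- **" ++ table ++ "** (" ++ PySem.Int.toStr (items.length : Int) ++ " tests)"]))) []

-- ===== PORT B =====
-- rendering of one run of equal tables (the two branches of B's while-loop body)
def pvRenderGroupB (indent table : String) (grp : List (List (String × String))) : List String :=
  if grp.length == 1 then
    let t := grp.headD []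
    let col := pvCol t
    let display := pvDisp t
    if col == "" then [indent ++ "- `" ++ table ++ "` — " ++ display]
    else [indent ++ "- `" ++ table ++ "." ++ col ++ "` — " ++ display]
  else
    (indent ++ "- **" ++ table ++ "** (" ++ PySem.Int.toStr (grp.length : Int) ++ " tests)")
      :: grp.map (fun t =>
        let col := pvCol t
        let display := pvDisp t
        let label := if col == "" then "table-level" else col
        indent ++ "    - `" ++ label ++ "` — " ++ display)

-- B's while-loop: split off the leading run of equal tables, render it, recurse on the rest
def pvBLoop (indent : String) : List (List (String × String)) → List String
  | [] => []
  | t :: rest =>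
    let table := pvTb t
    pvRenderGroupB indent table (t :: rest.takeWhile (fun u => pvTb u == table))
      ++ pvBLoop indent (rest.dropWhile (fun u => pvTb u == table))
termination_by l => l.length
decreasing_by
  exact Nat.lt_succ_of_le (List.Sublist.length_le (List.dropWhile_sublist _))

def format_test_list_by_table_py_alt (tests : List (List (String × String))) (indent : String) : List String :=
  let ordered := PySem.List.sorted (PySem.List.sorted tests pvCol false) pvTb false
  pvBLoop indent ordered

-- ===== PRECONDITION & SPEC =====
-- Pre_ excludes exactly the inputs where some test dict lacks the "table" key: there the
-- Python A (and B) raises KeyError.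
def Pre_format_test_list_by_table_py (tests : List (List (String × String))) (indent : String) : Prop :=
  tests.all (fun t => (PySem.Dict.get? (PySem.Dict.mk t) "table").isSome) = true
instance (tests : List (List (String × String))) (indent : String) : Decidable (Pre_format_test_list_by_table_py tests indent) := by unfold Pre_format_test_list_by_table_py; infer_instance

def pvWitness_format_test_list_by_table_py : (List (List (String × String))) × String :=
  ([[("table", "person"), ("column_name", "year")], [("table", "person")], [("table", "visit"), ("display", "d")]], "  ")

def Spec_format_test_list_by_table_py (tests : List (List (String × String))) (indent : String) (out : List String) : Prop := out = format_test_list_by_table_py_alt tests indent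
instance (tests : List (List (String × String))) (indent : String) (out : List String) : Decidable (Spec_format_test_list_by_table_py tests indent out) := by unfold Spec_format_test_list_by_table_py; infer_instance

-- ===== CLAIM (what is proved, stated in full; the proofs are below) =====
def Claim_equal_format_test_list_by_table_py : Prop := ∀ (tests : List (List (String × String))) (indent : String), Dom_format_test_list_by_table_py tests indent → Pre_format_test_list_by_table_py tests indent → Spec_format_test_list_by_table_py tests indent (format_test_list_by_table_py tests indent)

-- ===== LEMMAS AND PROOFS =====

-- filter with a stronger predicate absorbs a weaker outer filter
theorem pv_filter_filter_of_imp {α : Type} (p q : α → Bool) (l : List α)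
    (h : ∀ a, q a = true → p a = true) : (l.filter p).filter q = l.filter q := by
  rw [List.filter_filter]
  apply List.filter_congr
  intro a _
  by_cases hq : q a = true
  · simp [hq, h a hq]
  · simp [Bool.not_eq_true] at hq
    simp [hq]

theorem pv_filter_filter_of_none {α : Type} (p q : α → Bool) (l : List α)
    (h : ∀ a, q a = true → p a = false) : (l.filter p).filter q = [] := by
  rw [List.filter_filter]
  apply List.filter_eq_nil_iff.mpr
  intro a _
  intro hc
  simp only [Bool.and_eq_true] at hc
  obtain ⟨hq, hp⟩ := hc
  rw [h a hq] at hp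
  exact Bool.false_ne_true hp

-- the insertion step of Python's stable sort, on an already key-ordered list
theorem pv_insertBy_split {α : Type} (key : α → String) (x : α) (ys : List α)
    (h : ys.Pairwise (fun a b => key a ≤ key b)) :
    PySem.List.insertBy (fun a b => decide (key a < key b)) x ys
      = ys.filter (fun y => !decide (key x < key y)) ++ x :: ys.filter (fun y => decide (key x < key y)) := by
  induction ys with
  | nil => simp [PySem.List.insertBy]
  | cons y ys ih =>
    rw [List.pairwise_cons] at h
    obtain ⟨hy, hys⟩ := h
    by_cases hlt : key x < key y
    · have h1 : ys.filter (fun b => !decide (key x < key b)) = [] := by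
        apply List.filter_eq_nil_iff.mpr
        intro b hb
        simp [lt_of_lt_of_le hlt (hy b hb)]
      have h2 : ys.filter (fun b => decide (key x < key b)) = ys := by
        apply List.filter_eq_self.mpr
        intro b hb
        simp [lt_of_lt_of_le hlt (hy b hb)]
      have hd : decide (key x < key y) = true := decide_eq_true hlt
      simp only [PySem.List.insertBy, hd, if_true, List.filter_cons, Bool.not_true,
        Bool.false_eq_true, if_false, h1, h2]
      simp
    · have hd : decide (key x < key y) = false := decide_eq_false hlt
      simp only [PySem.List.insertBy, hd, Bool.false_eq_true, if_false, List.filter_cons,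
        Bool.not_false, if_true, ih hys]
      simp

-- STABILITY of Python's sorted: the elements of each key-class keep their input order
theorem pv_sorted_stable {α : Type} (key : α → String) (xs : List α) (k : String) :
    (PySem.List.sorted xs key false).filter (fun t => key t == k)
      = xs.filter (fun t => key t == k) := by
  induction xs using List.reverseRecOn with
  | nil => rw [(PySem.List.sorted_eq_nil_iff ([] : List α) key false).mpr rfl]
  | append_singleton xs x ih =>
    have hstep : PySem.List.sorted (xs ++ [x]) key false
        = PySem.List.insertBy (fun a b => decide (key a < key b)) x (PySem.List.sorted xs key false) := by
      rw [PySem.List.sorted_eq_foldl_insertBy, PySem.List.sorted_eq_foldl_insertBy, List.foldl_append]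
      rfl
    rw [hstep, pv_insertBy_split key x _ (PySem.List.sorted_pairwise xs key),
      List.filter_append, List.filter_cons]
    by_cases hk : key x = k
    · have f1 : ((PySem.List.sorted xs key false).filter (fun y => !decide (key x < key y))).filter
          (fun t => key t == k) = (PySem.List.sorted xs key false).filter (fun t => key t == k) := by
        apply pv_filter_filter_of_imp
        intro a ha
        have : key a = k := by simpa using ha
        simp [this, ← hk]
      have f2 : ((PySem.List.sorted xs key false).filter (fun y => decide (key x < key y))).filter
          (fun t => key t == k) = [] := by
        apply pv_filter_filter_of_none
        intro a ha
        have : key a = k := by simpa using ha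
        simp [this, ← hk]
      rw [f1, f2, ih]
      simp [hk]
    · have hqx : (key x == k) = false := by simpa using hk
      by_cases hlt : key x < k
      · have f1 : ((PySem.List.sorted xs key false).filter (fun y => !decide (key x < key y))).filter
            (fun t => key t == k) = [] := by
          apply pv_filter_filter_of_none
          intro a ha
          have : key a = k := by simpa using ha
          simp [this, hlt]
        have f2 : ((PySem.List.sorted xs key false).filter (fun y => decide (key x < key y))).filter
            (fun t => key t == k) = (PySem.List.sorted xs key false).filter (fun t => key t == k) := by
          apply pv_filter_filter_of_imp
          intro a ha
          have : key a = k := by simpa using ha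
          simp [this, hlt]
        rw [f1, f2, ih]
        simp [hqx]
      · have f1 : ((PySem.List.sorted xs key false).filter (fun y => !decide (key x < key y))).filter
            (fun t => key t == k) = (PySem.List.sorted xs key false).filter (fun t => key t == k) := by
          apply pv_filter_filter_of_imp
          intro a ha
          have : key a = k := by simpa using ha
          simp [this, hlt]
        have f2 : ((PySem.List.sorted xs key false).filter (fun y => decide (key x < key y))).filter
            (fun t => key t == k) = [] := by
          apply pv_filter_filter_of_none
          intro a ha
          have : key a = k := by simpa using ha
          simp [this, hlt]
        rw [f1, f2, ih]
        simp [hqx]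

-- a key-ordered list is determined by its key-class filters
theorem pv_sorted_unique {α : Type} (key : α → String) (ys zs : List α)
    (hy : ys.Pairwise (fun a b => key a ≤ key b)) (hz : zs.Pairwise (fun a b => key a ≤ key b))
    (hf : ∀ k, ys.filter (fun t => key t == k) = zs.filter (fun t => key t == k)) :
    ys = zs := by
  induction ys generalizing zs with
  | nil =>
    cases zs with
    | nil => rfl
    | cons z zs =>
      exfalso
      have h1 := hf (key z)
      rw [List.filter_cons] at h1
      simp at h1
  | cons y ys ih =>
    cases zs with
    | nil =>
      exfalso
      have h1 := hf (key y)
      rw [List.filter_cons] at h1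
      simp at h1
    | cons z zs =>
      rw [List.pairwise_cons] at hy hz
      have hne1 : (z :: zs).filter (fun t => key t == key y) ≠ [] := by
        intro hemp
        have h1 := hf (key y)
        rw [hemp, List.filter_cons] at h1
        simp at h1
      have hne2 : (y :: ys).filter (fun t => key t == key z) ≠ [] := by
        intro hemp
        have h1 := hf (key z)
        rw [hemp, List.filter_cons] at h1
        simp at h1
      have hzy : key z ≤ key y := by
        obtain ⟨w, hw⟩ := List.exists_mem_of_ne_nil _ hne1
        obtain ⟨hwm, hwk⟩ := List.mem_filter.mp hw
        have hwk' : key w = key y := by simpa using hwk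
        rcases List.mem_cons.mp hwm with rfl | hwzs
        · exact le_of_eq hwk'
        · exact hwk' ▸ hz.1 w hwzs
      have hyz : key y ≤ key z := by
        obtain ⟨w, hw⟩ := List.exists_mem_of_ne_nil _ hne2
        obtain ⟨hwm, hwk⟩ := List.mem_filter.mp hw
        have hwk' : key w = key z := by simpa using hwk
        rcases List.mem_cons.mp hwm with rfl | hwys
        · exact le_of_eq hwk'
        · exact hwk' ▸ hy.1 w hwys
      have hk : key z = key y := le_antisymm hzy hyz
      have h0 := hf (key y)
      rw [List.filter_cons, List.filter_cons] at h0
      simp only [beq_self_eq_true, hk, if_pos] at h0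
      obtain ⟨hyzeq, htail⟩ := List.cons_eq_cons.mp h0
      subst hyzeq
      have htl : ys = zs := by
        apply ih zs hy.2 hz.2
        intro k
        by_cases hky : k = key y
        · subst hky; exact htail
        · have h2 := hf k
          rw [List.filter_cons, List.filter_cons] at h2
          have hb1 : (key y == k) = false := by simp; exact fun h => hky h.symm
          rw [hb1] at h2
          simpa using h2
      rw [htl]

-- a concatenation of constant-key chunks along strictly increasing keys is key-ordered
theorem pv_pairwise_flatMap {α : Type} (key : α → String) {ks : List String}
    (chunk : String → List α) (hks : ks.Pairwise (· < ·))
    (hkey : ∀ k ∈ ks, ∀ t ∈ chunk k, key t = k) :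
    (ks.flatMap chunk).Pairwise (fun a b => key a ≤ key b) := by
  induction ks with
  | nil => simp
  | cons k ks ih =>
    rw [List.pairwise_cons] at hks
    rw [List.flatMap_cons, List.pairwise_append]
    refine ⟨?_, ?_, ?_⟩
    · apply List.pairwise_of_forall_mem_list
      intro a ha b hb
      rw [hkey k List.mem_cons_self a ha, hkey k List.mem_cons_self b hb]
    · exact ih hks.2 (fun j hj => hkey j (List.mem_cons_of_mem k hj))
    · intro a ha b hb
      obtain ⟨j, hj, hbj⟩ := List.mem_flatMap.mp hb
      rw [hkey k List.mem_cons_self a ha, hkey j (List.mem_cons_of_mem k hj) b hbj]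
      exact le_of_lt (hks.1 j hj)

-- filtering one key-class out of a concatenation of key-class chunks
theorem pv_flatMap_filter {α : Type} (key : α → String) (xs : List α) (ks : List String)
    (k0 : String) (hnd : ks.Nodup) :
    (ks.flatMap (fun j => xs.filter (fun t => key t == j))).filter (fun t => key t == k0)
      = if k0 ∈ ks then xs.filter (fun t => key t == k0) else [] := by
  induction ks with
  | nil => simp
  | cons j ks ih =>
    rw [List.nodup_cons] at hnd
    rw [List.flatMap_cons, List.filter_append, ih hnd.2]
    by_cases hj : j = k0
    · subst hj
      rw [pv_filter_filter_of_imp _ _ _ (fun a ha => ha), if_neg hnd.1, if_pos List.mem_cons_self,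
        List.append_nil]
    · rw [pv_filter_filter_of_none]
      · simp only [List.nil_append, List.mem_cons]
        by_cases hm : k0 ∈ ks
        · rw [if_pos hm, if_pos (Or.inr hm)]
        · rw [if_neg hm, if_neg (by rintro (h | h); exact hj h.symm; exact hm h)]
      · intro a ha
        simp only [beq_iff_eq] at ha ⊢
        rw [ha]
        simp only [beq_eq_false_iff_ne, ne_eq]
        exact fun h => hj h.symm

-- sorted = the key-classes, in increasing key order (stability + order pins it down)
theorem pv_sorted_decomp {α : Type} (key : α → String) (xs : List α) :
    PySem.List.sorted xs key false
      = (PySem.List.sorted (PySem.List.dedup (xs.map key)) (fun k => k) false).flatMap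
          (fun k => xs.filter (fun t => key t == k)) := by
  apply pv_sorted_unique key
  · exact PySem.List.sorted_pairwise xs key
  · apply pv_pairwise_flatMap key
    · rw [PySem.List.dedup_eq_ofList]
      exact PySem.List.sorted_ofList_pairwise_lt (xs.map key)
    · intro k _ t ht
      simpa using (List.mem_filter.mp ht).2
  · intro k0
    rw [pv_sorted_stable, pv_flatMap_filter]
    · by_cases hmem : k0 ∈ PySem.List.sorted (PySem.List.dedup (xs.map key)) (fun k => k) false
      · rw [if_pos hmem]
      · rw [if_neg hmem]
        apply List.filter_eq_nil_iff.mpr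
        intro t ht hkt
        apply hmem
        rw [PySem.List.mem_sorted, PySem.List.mem_dedup]
        exact (eq_of_beq hkt) ▸ List.mem_map_of_mem ht
    · have : List.Pairwise (· < ·) (PySem.List.sorted (PySem.List.dedup (xs.map key)) (fun k => k) false) := by
        rw [PySem.List.dedup_eq_ofList]
        exact PySem.List.sorted_ofList_pairwise_lt (xs.map key)
      exact this.nodup

-- filtering commutes with a stable sort
theorem pv_filter_sorted {α : Type} (key : α → String) (p : α → Bool) (xs : List α) :
    (PySem.List.sorted xs key false).filter p = PySem.List.sorted (xs.filter p) key false := by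
  apply pv_sorted_unique key
  · exact (PySem.List.sorted_pairwise xs key).filter p
  · exact PySem.List.sorted_pairwise _ key
  · intro k
    have hcomm : ∀ (l : List α), l.filter (fun a => (key a == k) && p a)
        = (l.filter (fun t => key t == k)).filter p := by
      intro l
      rw [List.filter_filter]
      apply List.filter_congr
      intro a _
      exact Bool.and_comm _ _
    rw [pv_sorted_stable key (xs.filter p) k, List.filter_filter, List.filter_filter,
      hcomm, hcomm, pv_sorted_stable]

theorem pv_takeWhile_append_all {α : Type} (p : α → Bool) (l r : List α)
    (h : ∀ x ∈ l, p x = true) : (l ++ r).takeWhile p = l ++ r.takeWhile p := by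
  induction l with
  | nil => simp
  | cons a l ih =>
    simp [h a (List.mem_cons_self), ih (fun x hx => h x (List.mem_cons_of_mem a hx))]

theorem pv_dropWhile_append_all {α : Type} (p : α → Bool) (l r : List α)
    (h : ∀ x ∈ l, p x = true) : (l ++ r).dropWhile p = r.dropWhile p := by
  induction l with
  | nil => simp
  | cons a l ih =>
    simp [h a (List.mem_cons_self), ih (fun x hx => h x (List.mem_cons_of_mem a hx))]

-- B's run-splitting loop over a concatenation of nonempty constant-key chunks with
-- strictly increasing keys renders exactly one group per chunk
theorem pv_bloop_flatMap (indent : String) (ks : List String)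
    (chunk : String → List (List (String × String)))
    (hks : ks.Pairwise (· < ·))
    (hne : ∀ k ∈ ks, chunk k ≠ [])
    (hkey : ∀ k ∈ ks, ∀ t ∈ chunk k, pvTb t = k) :
    pvBLoop indent (ks.flatMap chunk) = ks.flatMap (fun k => pvRenderGroupB indent k (chunk k)) := by
  induction ks with
  | nil => simp [pvBLoop]
  | cons k ks ih =>
    rw [List.pairwise_cons] at hks
    obtain ⟨t, g, htg⟩ : ∃ t g, chunk k = t :: g := by
      cases hc : chunk k with
      | nil => exact absurd hc (hne k List.mem_cons_self)
      | cons t g => exact ⟨t, g, rfl⟩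
    have hkk : ∀ u ∈ chunk k, pvTb u = k := hkey k List.mem_cons_self
    have htb : pvTb t = k := hkk t (htg ▸ List.mem_cons_self)
    have hrest : ∀ u ∈ ks.flatMap chunk, (pvTb u == k) = false := by
      intro u hu
      obtain ⟨j, hj, huj⟩ := List.mem_flatMap.mp hu
      have hju : pvTb u = j := hkey j (List.mem_cons_of_mem _ hj) u huj
      simp only [hju, beq_eq_false_iff_ne, ne_eq]
      intro h
      exact absurd (h ▸ hks.1 j hj) (lt_irrefl k)
    rw [List.flatMap_cons, List.flatMap_cons, htg, List.cons_append, pvBLoop, htb]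
    have htake : (g ++ ks.flatMap chunk).takeWhile (fun u => pvTb u == k) = g := by
      rw [pv_takeWhile_append_all _ _ _
        (fun u hu => by simp [hkk u (htg ▸ List.mem_cons_of_mem t hu)])]
      cases hr : ks.flatMap chunk with
      | nil => simp
      | cons r rest =>
        rw [List.takeWhile_cons, hrest r (hr ▸ List.mem_cons_self)]
        simp
    have hdrop : (g ++ ks.flatMap chunk).dropWhile (fun u => pvTb u == k) = ks.flatMap chunk := by
      rw [pv_dropWhile_append_all _ _ _
        (fun u hu => by simp [hkk u (htg ▸ List.mem_cons_of_mem t hu)])]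
      cases hr : ks.flatMap chunk with
      | nil => simp
      | cons r rest =>
        rw [List.dropWhile_cons, hrest r (hr ▸ List.mem_cons_self)]
        simp
    rw [htake, hdrop, ih hks.2 (fun j hj => hne j (List.mem_cons_of_mem _ hj))
      (fun j hj => hkey j (List.mem_cons_of_mem _ hj))]

-- what A's emit loop appends for one table (its two branches, inner loop as a map)
def pvGA (indent table : String) (items : List (List (String × String))) : List String :=
  if items.length == 1 then
    let t := items.headD []
    let col := pvCol t
    let display := pvDisp t
    let label := if col == "" then table else table ++ "." ++ col
    [indent ++ "- `" ++ label ++ "` — " ++ display]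
  else
    (indent ++ "- **" ++ table ++ "** (" ++ PySem.Int.toStr (items.length : Int) ++ " tests)")
      :: (PySem.List.sorted items pvCol false).map (fun t =>
        let col := pvCol t
        let display := pvDisp t
        let label := if col == "" then "table-level" else col
        indent ++ "    - `" ++ label ++ "` — " ++ display)

theorem pv_bytable_keys (tests : List (List (String × String))) :
    (tests.foldl (fun d t => d.modify (pvTb t) [] (fun v => v ++ [t])) PySem.Dict.empty).keys
      = PySem.List.dedup (tests.map pvTb) := by
  rw [PySem.Dict.keys_foldl_modify_key tests pvTb [] (fun _ t => fun v => v ++ [t]),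
    PySem.Dict.keys_empty, PySem.Set.update_nil_left, PySem.List.dedup_eq_ofList]

theorem pv_bytable_getD (tests : List (List (String × String))) (k : String) :
    (tests.foldl (fun d t => d.modify (pvTb t) [] (fun v => v ++ [t])) PySem.Dict.empty).getD k []
      = tests.filter (fun t => pvTb t == k) := by
  have h1 : tests.foldl (fun d t => d.modify (pvTb t) [] (fun v => v ++ [t])) PySem.Dict.empty
      = (tests.map (fun t => (pvTb t, t))).foldl
          (fun d p => d.modify p.1 [] (fun v => v ++ [p.2])) PySem.Dict.empty := by
    rw [List.foldl_map]
  rw [h1, PySem.Dict.getD_foldl_modify_append]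
  simp [List.filter_map, Function.comp_def]

theorem pv_A_flat (tests : List (List (String × String))) (indent : String) :
    format_test_list_by_table_py tests indent
      = (PySem.List.sorted (PySem.List.dedup (tests.map pvTb)) (fun k => k) false).flatMap
          (fun k => pvGA indent k (tests.filter (fun t => pvTb t == k))) := by
  unfold format_test_list_by_table_py
  simp only [pv_bytable_keys, pv_bytable_getD]
  have hbody : ∀ table ∈ PySem.List.sorted (PySem.List.dedup (tests.map pvTb)) (fun k => k) false,
      ∀ lines : List String,
      (if ((tests.filter (fun t => pvTb t == table)).length == 1) = true then
        lines ++
          [(indent ++ "- `" ++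
              (if (pvCol ((tests.filter (fun t => pvTb t == table)).headD []) == "") = true then table
               else table ++ "." ++ pvCol ((tests.filter (fun t => pvTb t == table)).headD []))) ++
            "` — " ++ pvDisp ((tests.filter (fun t => pvTb t == table)).headD [])]
      else
        List.foldl (fun lines t =>
            lines ++ [(indent ++ "    - `" ++
              (if (pvCol t == "") = true then "table-level" else pvCol t)) ++ "` — " ++ pvDisp t])
          (lines ++ [indent ++ "- **" ++ table ++ "** (" ++
            PySem.Int.toStr ((tests.filter (fun t => pvTb t == table)).length : Int) ++ " tests)"])
          (PySem.List.sorted (tests.filter (fun t => pvTb t == table)) pvCol false))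
      = lines ++ pvGA indent table (tests.filter (fun t => pvTb t == table)) := by
    intro table _ lines
    unfold pvGA
    by_cases h : ((tests.filter (fun t => pvTb t == table)).length == 1) = true
    · simp only [h, if_true]
    · simp only [h, Bool.false_eq_true, if_false, PySem.List.foldl_append_singleton_eq_map]
      simp
  rw [PySem.List.foldl_congr_mem' _ _
      (fun lines table => lines ++ pvGA indent table (tests.filter (fun t => pvTb t == table))) _ hbody,
    PySem.List.foldl_append_eq_flatMap, List.nil_append]

theorem pv_render_eq (indent table : String) (items : List (List (String × String))) :
    pvGA indent table items = pvRenderGroupB indent table (PySem.List.sorted items pvCol false) := by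
  unfold pvGA pvRenderGroupB
  rw [PySem.List.length_sorted]
  by_cases hlen : (items.length == 1) = true
  · have h1 : items.length = 1 := by simpa using hlen
    obtain ⟨t, rfl⟩ := List.length_eq_one_iff.mp h1
    rw [PySem.List.sorted_eq_self_of_pairwise [t] pvCol (List.pairwise_singleton _ _)]
    simp only [hlen, if_true]
    simp only [List.headD_cons]
    by_cases hc : (pvCol t == "") = true
    · simp [hc]
    · simp only [hc, Bool.false_eq_true, if_false]
      simp [String.append_assoc]
  · simp only [hlen, Bool.false_eq_true, if_false]

theorem pv_B_flat (tests : List (List (String × String))) (indent : String) :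
    format_test_list_by_table_py_alt tests indent
      = (PySem.List.sorted (PySem.List.dedup (tests.map pvTb)) (fun k => k) false).flatMap
          (fun k => pvRenderGroupB indent k
            (PySem.List.sorted (tests.filter (fun t => pvTb t == k)) pvCol false)) := by
  unfold format_test_list_by_table_py_alt
  have hks : PySem.List.sorted (PySem.List.dedup ((PySem.List.sorted tests pvCol false).map pvTb)) (fun k => k) false
      = PySem.List.sorted (PySem.List.dedup (tests.map pvTb)) (fun k => k) false := by
    apply PySem.List.sorted_eq_sorted_of_perm _ _ _ (fun a b h => h)
    apply (List.perm_ext_iff_of_nodup (PySem.List.nodup_dedup _) (PySem.List.nodup_dedup _)).mpr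
    intro a
    rw [PySem.List.mem_dedup, PySem.List.mem_dedup]
    constructor
    · intro h
      obtain ⟨t, ht, rfl⟩ := List.mem_map.mp h
      exact List.mem_map_of_mem ((PySem.List.mem_sorted tests pvCol false t).mp ht)
    · intro h
      obtain ⟨t, ht, rfl⟩ := List.mem_map.mp h
      exact List.mem_map_of_mem ((PySem.List.mem_sorted tests pvCol false t).mpr ht)
  have hchunk : ∀ k, (PySem.List.sorted tests pvCol false).filter (fun t => pvTb t == k)
      = PySem.List.sorted (tests.filter (fun t => pvTb t == k)) pvCol false :=
    fun k => pv_filter_sorted pvCol (fun t => pvTb t == k) tests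
  have hpl : List.Pairwise (· < ·)
      (PySem.List.sorted (PySem.List.dedup (tests.map pvTb)) (fun k => k) false) := by
    rw [PySem.List.dedup_eq_ofList]
    exact PySem.List.sorted_ofList_pairwise_lt (tests.map pvTb)
  rw [pv_sorted_decomp pvTb (PySem.List.sorted tests pvCol false), hks]
  simp only [hchunk]
  apply pv_bloop_flatMap indent _ _ hpl
  · intro k hk
    rw [ne_eq, PySem.List.sorted_eq_nil_iff]
    rw [PySem.List.mem_sorted, PySem.List.mem_dedup] at hk
    obtain ⟨t, ht, rfl⟩ := List.mem_map.mp hk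
    intro hemp
    have : t ∈ tests.filter (fun u => pvTb u == pvTb t) :=
      List.mem_filter.mpr ⟨ht, by simp⟩
    rw [hemp] at this
    exact absurd this (List.not_mem_nil)
  · intro k _ t ht
    rw [PySem.List.mem_sorted] at ht
    simpa using (List.mem_filter.mp ht).2

-- ===== VERDICT (by name: the statement is the Claim_ definition above) =====
theorem format_test_list_by_table_py_spec : Claim_equal_format_test_list_by_table_py := by
  intro tests indent _ _
  unfold Spec_format_test_list_by_table_py
  rw [pv_A_flat, pv_B_flat]
  simp only [pv_render_eq]
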